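-- pv_equiv track=rewrite | github.com/epalcu/metabolic-type-calculator | src/MetabolicTypeCalculator.py | _getGroupsWithSameTotals
-- ===== SOURCE A (Python) =====
-- def _getGroupsWithSameTotals(d, toInt=False):
--     totals = {}
--     sameTotals = []
--     for key in d:
--         keyValue = str(key) if (not toInt) else int(key)
--         if d[key] in totals:
--             totals[d[key]].append(keyValue)
--             sameTotals = totals[d[key]][:]
--         else:
--             totals[d[key]] = [keyValue]
--
--     return sameTotals
-- ===== SOURCE B (Python) =====
-- def _getGroupsWithSameTotals(d, toInt=False):
--     groups = {}
--     for key in d: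
--         groups.setdefault(d[key], []).append(str(key) if (not toInt) else int(key))
--     for key in reversed(list(d)):
--         group = groups[d[key]]
--         if len(group) > 1:
--             return group[:]
--     return []
-- ===== Notes on version B (the rewrite author's own statement) =====
-- stated objective: simpler
-- what changed: A keeps a running snapshot copy of the current duplicate group while grouping; B first builds the value->keys groups in one pass, then scans the keys back-to-front and returns the first (i.e. last-in-order) group with more than one member, so the snapshot bookkeeping disappears.
-- outside the precondition, e.g. on _getGroupsWithSameTotals({'1': 5, '2': 5}, True): A returns [1, 2], B returns [1, 2]
import Mathlib
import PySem

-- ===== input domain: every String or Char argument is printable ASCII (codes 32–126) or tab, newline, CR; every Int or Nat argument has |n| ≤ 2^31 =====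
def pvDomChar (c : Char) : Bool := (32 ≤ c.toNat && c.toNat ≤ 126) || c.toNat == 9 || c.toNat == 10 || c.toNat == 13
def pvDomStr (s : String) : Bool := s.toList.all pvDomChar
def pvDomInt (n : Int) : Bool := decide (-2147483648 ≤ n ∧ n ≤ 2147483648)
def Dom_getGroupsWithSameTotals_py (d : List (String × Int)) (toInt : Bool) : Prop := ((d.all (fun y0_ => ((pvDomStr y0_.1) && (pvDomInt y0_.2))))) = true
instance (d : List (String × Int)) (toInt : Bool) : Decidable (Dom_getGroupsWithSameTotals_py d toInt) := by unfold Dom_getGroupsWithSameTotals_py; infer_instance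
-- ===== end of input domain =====

-- B replaces A's running snapshot copy with build-groups-then-scan-backwards: simpler, no repeated list copies.

-- shared with both ports: the Python argument is a dict, so the association list is
-- normalised the way dict construction does it (first position kept, later value overwrites)
def pvDictOf (d : List (String × Int)) : List (String × Int) :=
  (d.foldl (fun acc kv => acc.insert kv.1 kv.2) PySem.Dict.empty).items

-- 'str(key) if (not toInt) else int(key)' — exact for toInt = false (keys are strings);
-- toInt = true with a nonempty dict is outside Pre_ (Python then returns ints, not strings, or raises ValueError)
def pvConv (toInt : Bool) (k : String) : String :=
  if toInt then PySem.Int.toStr ((PySem.Int.ofStr? k).getD 0) else k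

-- ===== PORT A =====
def getGroupsWithSameTotals_py (d : List (String × Int)) (toInt : Bool) : List String :=
  ((pvDictOf d).foldl
    (fun (st : PySem.Dict Int (List String) × List String) kv =>
      let keyValue := pvConv toInt kv.1
      match st.1.get? kv.2 with
      | some g => (st.1.insert kv.2 (g ++ [keyValue]), g ++ [keyValue])
      | none   => (st.1.insert kv.2 [keyValue], st.2))
    (PySem.Dict.empty, [])).2

-- ===== PORT B =====
def pvGroups (toInt : Bool) (items : List (String × Int)) : PySem.Dict Int (List String) :=
  items.foldl (fun acc kv => acc.insert kv.2 (acc.getD kv.2 [] ++ [pvConv toInt kv.1])) PySem.Dict.empty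

def pvScanBack (groups : PySem.Dict Int (List String)) : List (String × Int) → List String
  | [] => []
  | kv :: rest =>
      let g := groups.getD kv.2 []
      if 1 < g.length then g else pvScanBack groups rest

def getGroupsWithSameTotals_py_alt (d : List (String × Int)) (toInt : Bool) : List String :=
  let items := pvDictOf d
  pvScanBack (pvGroups toInt items) items.reverse

-- ===== PRECONDITION & SPEC =====
-- Pre_ excludes toInt = true with a nonempty dict: there Python A either raises ValueError
-- (non-int-like key) or returns a list of ints, which is not a value of the declared type List String.
def Pre_getGroupsWithSameTotals_py (d : List (String × Int)) (toInt : Bool) : Prop :=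
  toInt = false ∨ d = []
instance (d : List (String × Int)) (toInt : Bool) : Decidable (Pre_getGroupsWithSameTotals_py d toInt) := by
  unfold Pre_getGroupsWithSameTotals_py; infer_instance

def pvWitness_getGroupsWithSameTotals_py : (List (String × Int)) × Bool :=
  ([("a", 1), ("b", 2), ("c", 1)], false)

def Spec_getGroupsWithSameTotals_py (d : List (String × Int)) (toInt : Bool) (out : List String) : Prop := out = getGroupsWithSameTotals_py_alt d toInt
instance (d : List (String × Int)) (toInt : Bool) (out : List String) : Decidable (Spec_getGroupsWithSameTotals_py d toInt out) := by unfold Spec_getGroupsWithSameTotals_py; infer_instance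

-- ===== CLAIM (what is proved, stated in full; the proofs are below) =====
def Claim_equal_getGroupsWithSameTotals_py : Prop := ∀ (d : List (String × Int)) (toInt : Bool), Dom_getGroupsWithSameTotals_py d toInt → Pre_getGroupsWithSameTotals_py d toInt → Spec_getGroupsWithSameTotals_py d toInt (getGroupsWithSameTotals_py d toInt)

-- ===== LEMMAS AND PROOFS =====

-- every group ever stored is nonempty (it ends with the key just converted)
theorem pvGroups_nonempty (toInt : Bool) (l : List (String × Int)) (v : Int) (g : List String)
    (h : (pvGroups toInt l).get? v = some g) : g ≠ [] := by
  induction l using List.reverseRecOn generalizing g with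
  | nil => simp [pvGroups, PySem.Dict.get?_empty] at h
  | append_singleton p kv ih =>
    simp only [pvGroups, List.foldl_append, List.foldl_cons, List.foldl_nil] at h
    rw [PySem.Dict.get?_insert] at h
    split at h
    · cases h; simp
    · exact ih _ h

-- a value absent from pvGroups never occurs among the list's values
theorem pvGroups_get?_none (toInt : Bool) (l : List (String × Int)) (v : Int)
    (h : (pvGroups toInt l).get? v = none) : ∀ kv ∈ l, kv.2 ≠ v := by
  intro kv hkv heq
  rw [PySem.Dict.get?_eq_none_iff_not_mem_keys] at h
  apply h
  have hk : (pvGroups toInt l).keys = PySem.Set.update (PySem.Dict.empty : PySem.Dict Int (List String)).keys (l.map (·.2)) :=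
    PySem.Dict.keys_foldl_insert_key l (·.2) _ _
  rw [hk]
  simp only [PySem.Dict.keys_empty, PySem.Set.update_nil_left]
  rw [PySem.Set.mem_ofList]
  exact heq ▸ List.mem_map_of_mem hkv

-- the backward scan only inspects groups at values occurring in the list
theorem pvScanBack_congr (g1 g2 : PySem.Dict Int (List String)) (l : List (String × Int))
    (h : ∀ kv ∈ l, g1.getD kv.2 [] = g2.getD kv.2 []) : pvScanBack g1 l = pvScanBack g2 l := by
  induction l with
  | nil => rfl
  | cons kv rest ih =>
    simp only [pvScanBack]
    rw [h kv (List.mem_cons_self)]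
    exact if_congr Iff.rfl rfl (ih fun x hx => h x (List.mem_cons_of_mem _ hx))

-- the loop invariant: A's fold state over any prefix l is (B's groups over l, B's backward scan over l)
theorem pvFold_inv (toInt : Bool) (l : List (String × Int)) :
    l.foldl
      (fun (st : PySem.Dict Int (List String) × List String) kv =>
        let keyValue := pvConv toInt kv.1
        match st.1.get? kv.2 with
        | some g => (st.1.insert kv.2 (g ++ [keyValue]), g ++ [keyValue])
        | none   => (st.1.insert kv.2 [keyValue], st.2))
      (PySem.Dict.empty, [])
    = (pvGroups toInt l, pvScanBack (pvGroups toInt l) l.reverse) := by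
  induction l using List.reverseRecOn with
  | nil => rfl
  | append_singleton p kv ih =>
    rw [List.foldl_append, ih]
    simp only [List.foldl_cons, List.foldl_nil]
    have hG : pvGroups toInt (p ++ [kv]) =
        (pvGroups toInt p).insert kv.2 ((pvGroups toInt p).getD kv.2 [] ++ [pvConv toInt kv.1]) := by
      simp [pvGroups, List.foldl_append]
    cases hcase : (pvGroups toInt p).get? kv.2 with
    | some g =>
      have hgd : (pvGroups toInt p).getD kv.2 [] = g := PySem.Dict.getD_of_get?_eq_some _ _ hcase
      have hne : g ≠ [] := pvGroups_nonempty toInt p kv.2 g hcase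
      refine Prod.ext ?_ ?_
      · simp [hG, hgd]
      · show g ++ [pvConv toInt kv.1] = pvScanBack (pvGroups toInt (p ++ [kv])) (p ++ [kv]).reverse
        rw [List.reverse_append, List.reverse_singleton, List.singleton_append]
        simp only [pvScanBack, hG, hgd, PySem.Dict.getD_insert_self]
        rw [if_pos]
        have : 1 ≤ g.length := List.length_pos_iff.mpr hne
        simp; omega
    | none =>
      have hgd : (pvGroups toInt p).getD kv.2 [] = [] := PySem.Dict.getD_of_get?_eq_none _ _ hcase
      refine Prod.ext ?_ ?_
      · simp [hG, hgd]
      · show pvScanBack (pvGroups toInt p) p.reverse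
            = pvScanBack (pvGroups toInt (p ++ [kv])) (p ++ [kv]).reverse
        rw [List.reverse_append, List.reverse_singleton, List.singleton_append]
        have hstep : pvScanBack (pvGroups toInt (p ++ [kv])) (kv :: p.reverse)
            = pvScanBack (pvGroups toInt (p ++ [kv])) p.reverse := by
          simp only [pvScanBack, hG, hgd, PySem.Dict.getD_insert_self]
          rw [if_neg]; simp
        rw [hstep]
        apply pvScanBack_congr
        intro x hx
        have hxv : x.2 ≠ kv.2 := pvGroups_get?_none toInt p kv.2 hcase x (List.mem_reverse.mp hx)
        rw [hG, PySem.Dict.getD_insert, if_neg hxv]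

-- ===== VERDICT (by name: the statement is the Claim_ definition above) =====
theorem getGroupsWithSameTotals_py_spec : Claim_equal_getGroupsWithSameTotals_py := by
  intro d toInt _ _
  show getGroupsWithSameTotals_py d toInt = getGroupsWithSameTotals_py_alt d toInt
  unfold getGroupsWithSameTotals_py getGroupsWithSameTotals_py_alt
  rw [pvFold_inv]
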